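-- pv_equiv track=rewrite | github.com/nkonde1/githubTest | backend/backend_missing_files.py | _parse_suggestions_from_text
-- ===== SOURCE A (Python) =====
-- from typing import Optional, Union, Any
-- from typing import Dict, List, Optional, Any
-- from typing import Dict, List, Optional, Any
-- from typing import Dict, List, Optional, Any
-- from typing import List, Dict, Any
-- from typing import List, Dict, Any, Optional
-- from typing import List, Dict, Any
-- from typing import List, Dict, Any
-- from typing import Dict, List, Optional, Any
-- from typing import Dict, List, Optional, Any, Tuple
--
-- def _parse_suggestions_from_text(text: str) -> List[Dict[str, Any]]:
--     """Parse suggestions from text response"""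
--     # Simple text parsing fallback
--     suggestions = []
--     lines = text.split('\n')
--     current_suggestion = {}
--
--     for line in lines:
--         if 'suggestion' in line.lower() or line.strip().startswith(('1.', '2.', '3.', '4.', '5.')):
--             if current_suggestion:
--                 suggestions.append(current_suggestion)
--             current_suggestion = {'title': line.strip(), 'priority': 'Medium'}
--         elif current_suggestion and line.strip():
--             current_suggestion['description'] = current_suggestion.get('description', '') + line.strip() + ' '
--
--     if current_suggestion:
--         suggestions.append(current_suggestion)
--
--     return suggestions[:5]  # Limit to 5 suggestions
-- ===== SOURCE B (Python) =====
-- def _parse_suggestions_from_text(text):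
--     """Parse suggestions from text response (two-pass: group lines under headers, then render)."""
--     groups = []  # (header_line, body_lines) pairs; lines before the first header are dropped
--     for line in text.split('\n'):
--         if 'suggestion' in line.lower() or line.strip().startswith(('1.', '2.', '3.', '4.', '5.')):
--             groups.append((line, []))
--         elif groups:
--             groups[-1][1].append(line)
--     result = []
--     for header, body in groups[:5]:
--         item = {'title': header.strip(), 'priority': 'Medium'}
--         desc = ''.join(s.strip() + ' ' for s in body if s.strip())
--         if desc:
--             item['description'] = desc
--         result.append(item)
--     return result
-- ===== Notes on version B (the rewrite author's own statement) =====
-- stated objective: alternative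
-- what changed: B replaces A's one-pass state machine that mutates a current dict (incrementally concatenating the description) by a two-pass decomposition: first group the lines into (header, body-lines) pairs, then render the first five groups, building each description in one join over the stripped non-empty body lines.
import Mathlib
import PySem

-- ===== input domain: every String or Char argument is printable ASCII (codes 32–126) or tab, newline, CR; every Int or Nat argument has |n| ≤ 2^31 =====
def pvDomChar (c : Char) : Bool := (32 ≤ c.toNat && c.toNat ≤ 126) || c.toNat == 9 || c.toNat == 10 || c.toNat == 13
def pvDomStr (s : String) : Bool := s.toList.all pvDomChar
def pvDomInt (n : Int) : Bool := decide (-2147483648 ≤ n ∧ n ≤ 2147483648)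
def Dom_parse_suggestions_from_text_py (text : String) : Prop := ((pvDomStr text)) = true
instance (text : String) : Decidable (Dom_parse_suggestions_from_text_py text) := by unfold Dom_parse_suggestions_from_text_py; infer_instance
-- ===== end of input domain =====

-- B replaces A's one-pass dict-mutating state machine by a two-pass decomposition
-- (group lines under their header, then render each group); objective: alternative, same cost.

-- ===== PORT A =====
-- the loop body of A: state is (suggestions so far, current_suggestion); dict → PySem.Dict
def pvStepA (st : List (PySem.Dict String String) × PySem.Dict String String) (line : String) :
    List (PySem.Dict String String) × PySem.Dict String String :=
  if PySem.Str.isIn "suggestion" (PySem.Str.lower line) ||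
     PySem.Str.startswith (PySem.Str.strip line) "1." || PySem.Str.startswith (PySem.Str.strip line) "2." ||
     PySem.Str.startswith (PySem.Str.strip line) "3." || PySem.Str.startswith (PySem.Str.strip line) "4." ||
     PySem.Str.startswith (PySem.Str.strip line) "5." then
    ((if st.2.items.isEmpty then st.1 else st.1 ++ [st.2]),
     PySem.Dict.ofList [("title", PySem.Str.strip line), ("priority", "Medium")])
  else if !st.2.items.isEmpty && PySem.Str.strip line ≠ "" then
    (st.1, st.2.insert "description" (st.2.getD "description" "" ++ PySem.Str.strip line ++ " "))
  else st

def parse_suggestions_from_text_py (text : String) : List (List (String × String)) :=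
  let lines := (PySem.Str.split? text "\n").getD []
  let st := lines.foldl pvStepA ([], PySem.Dict.empty)
  let suggestions := if st.2.items.isEmpty then st.1 else st.1 ++ [st.2]
  -- split? is some (sep "\n" ≠ ""); suggestions[:5] with a nonnegative literal bound is List.take 5
  (suggestions.take 5).map PySem.Dict.items

-- ===== PORT B =====
def pvIsHeader (line : String) : Bool :=
  PySem.Str.isIn "suggestion" (PySem.Str.lower line) ||
  PySem.Str.startswith (PySem.Str.strip line) "1." || PySem.Str.startswith (PySem.Str.strip line) "2." ||
  PySem.Str.startswith (PySem.Str.strip line) "3." || PySem.Str.startswith (PySem.Str.strip line) "4." ||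
  PySem.Str.startswith (PySem.Str.strip line) "5."

-- first pass of B: group the lines into (header, body) pairs; groups[-1][1].append(line)
def pvGroupStep (groups : List (String × List String)) (line : String) : List (String × List String) :=
  if pvIsHeader line then groups ++ [(line, [])]
  else
    match groups.getLast? with
    | some (h, b) => groups.dropLast ++ [(h, b ++ [line])]
    | none => groups

-- second pass of B: render one group as a dict
def pvRender (g : String × List String) : PySem.Dict String String :=
  let item := PySem.Dict.ofList [("title", PySem.Str.strip g.1), ("priority", "Medium")]
  let desc := PySem.Str.join ""
    (((g.2.filter (fun s => PySem.Str.strip s ≠ "")).map (fun s => PySem.Str.strip s ++ " ")))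
  if desc ≠ "" then item.insert "description" desc else item

def parse_suggestions_from_text_py_alt (text : String) : List (List (String × String)) :=
  let groups := ((PySem.Str.split? text "\n").getD []).foldl pvGroupStep []
  ((groups.take 5).map pvRender).map PySem.Dict.items

-- ===== PRECONDITION & SPEC =====
def Spec_parse_suggestions_from_text_py (text : String) (out : List (List (String × String))) : Prop := out = parse_suggestions_from_text_py_alt text
instance (text : String) (out : List (List (String × String))) : Decidable (Spec_parse_suggestions_from_text_py text out) := by unfold Spec_parse_suggestions_from_text_py; infer_instance

-- ===== CLAIM (what is proved, stated in full; the proofs are below) =====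
def Claim_equal_parse_suggestions_from_text_py : Prop := ∀ (text : String), Dom_parse_suggestions_from_text_py text → Spec_parse_suggestions_from_text_py text (parse_suggestions_from_text_py text)

-- ===== LEMMAS AND PROOFS =====

-- A's per-body-line description update (the else-branch of A's loop, with the dict known nonempty)
def pvDescStep (d : PySem.Dict String String) (l : String) : PySem.Dict String String :=
  if PySem.Str.strip l ≠ "" then
    d.insert "description" (d.getD "description" "" ++ PySem.Str.strip l ++ " ")
  else d

-- A's incremental rendering of a group: fold the description update over the body
def pvRenderA (g : String × List String) : PySem.Dict String String :=
  g.2.foldl pvDescStep (PySem.Dict.ofList [("title", PySem.Str.strip g.1), ("priority", "Medium")])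

-- A's state, reconstructed from B's groups
def pvStateOf (groups : List (String × List String)) :
    List (PySem.Dict String String) × PySem.Dict String String :=
  match groups.getLast? with
  | none => ([], PySem.Dict.empty)
  | some g => (groups.dropLast.map pvRenderA, pvRenderA g)

lemma pvStepA_eq (st : List (PySem.Dict String String) × PySem.Dict String String) (line : String) :
    pvStepA st line =
      if pvIsHeader line then
        ((if st.2.items.isEmpty then st.1 else st.1 ++ [st.2]),
         PySem.Dict.ofList [("title", PySem.Str.strip line), ("priority", "Medium")])
      else if !st.2.items.isEmpty && PySem.Str.strip line ≠ "" then
        (st.1, st.2.insert "description" (st.2.getD "description" "" ++ PySem.Str.strip line ++ " "))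
      else st := rfl

lemma pvJoin_nil : PySem.Str.join "" [] = "" := by simp [PySem.Str.join]

lemma pvJoin_cons (x : String) (xs : List String) :
    PySem.Str.join "" (x :: xs) = x ++ PySem.Str.join "" xs := by
  apply String.toList_injective
  simp [PySem.Str.join, PySem.Chars.join]
  cases xs <;> simp [List.intercalate]

lemma pvInsert_ne_empty (d : PySem.Dict String String) (k v : String) :
    (d.insert k v).items.isEmpty = false := by
  rw [PySem.Dict.items_insert]
  split
  next h =>
    cases d with | _ items => cases items with
      | nil => simp at h
      | cons p t => simp
  next => simp

lemma pvD0_ne_empty (h : String) :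
    (PySem.Dict.ofList [("title", h), ("priority", "Medium")]).items.isEmpty = false := by
  simp [PySem.Dict.ofList, PySem.Dict.update, PySem.Dict.insert, PySem.Dict.empty]

lemma pvD0_not_contains (h : String) :
    (PySem.Dict.ofList [("title", h), ("priority", "Medium")]).contains "description" = false := by
  simp [PySem.Dict.ofList, PySem.Dict.update, PySem.Dict.insert, PySem.Dict.contains,
    PySem.Dict.empty]

lemma pvFoldDesc_ne_empty (b : List String) (d : PySem.Dict String String)
    (hd : d.items.isEmpty = false) : (b.foldl pvDescStep d).items.isEmpty = false := by
  induction b generalizing d with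
  | nil => exact hd
  | cons l t ih =>
    rw [List.foldl_cons]
    unfold pvDescStep
    split
    · exact ih _ (pvInsert_ne_empty _ _ _)
    · exact ih _ hd

lemma pvRenderA_ne_empty (g : String × List String) : (pvRenderA g).items.isEmpty = false :=
  pvFoldDesc_ne_empty _ _ (pvD0_ne_empty _)

def pvJoinBody (b : List String) : String :=
  PySem.Str.join "" ((b.filter (fun s => PySem.Str.strip s ≠ "")).map (fun s => PySem.Str.strip s ++ " "))

lemma pvDescFold_insert (b : List String) (d : PySem.Dict String String) (s : String) :
    b.foldl pvDescStep (d.insert "description" s) =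
      d.insert "description" (s ++ pvJoinBody b) := by
  induction b generalizing s with
  | nil => simp [pvJoinBody, pvJoin_nil]
  | cons l t ih =>
    rw [List.foldl_cons]
    by_cases hl : PySem.Str.strip l = ""
    · have hstep : pvDescStep (d.insert "description" s) l = d.insert "description" s := by
        unfold pvDescStep; rw [if_neg (by simp [hl])]
      rw [hstep, ih]
      simp [pvJoinBody, hl]
    · have hstep : pvDescStep (d.insert "description" s) l =
          d.insert "description" (s ++ PySem.Str.strip l ++ " ") := by
        unfold pvDescStep
        rw [if_pos hl, PySem.Dict.getD_insert_self, PySem.Dict.insert_insert_self]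
      rw [hstep, ih]
      congr 1
      apply String.toList_injective
      simp [pvJoinBody, hl, pvJoin_cons]

lemma pvJoinBody_cons_ne (l : String) (t : List String) (hl : ¬ PySem.Str.strip l = "") :
    pvJoinBody (l :: t) ≠ "" := by
  intro hc
  have := congrArg String.toList hc
  simp [pvJoinBody, hl, pvJoin_cons] at this

lemma pvDescFold_eq (b : List String) (d : PySem.Dict String String)
    (hd : d.contains "description" = false) :
    b.foldl pvDescStep d =
      (if pvJoinBody b ≠ "" then d.insert "description" (pvJoinBody b) else d) := by
  induction b with
  | nil => simp [pvJoinBody, pvJoin_nil]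
  | cons l t ih =>
    rw [List.foldl_cons]
    by_cases hl : PySem.Str.strip l = ""
    · have hstep : pvDescStep d l = d := by
        unfold pvDescStep; rw [if_neg (by simp [hl])]
      rw [hstep, ih]
      have : pvJoinBody (l :: t) = pvJoinBody t := by simp [pvJoinBody, hl]
      rw [this]
    · have hstep : pvDescStep d l = d.insert "description" ("" ++ PySem.Str.strip l ++ " ") := by
        unfold pvDescStep
        rw [if_pos hl, PySem.Dict.getD_of_not_contains d "" hd]
      rw [hstep, pvDescFold_insert, if_pos (pvJoinBody_cons_ne l t hl)]
      refine congrArg (PySem.Dict.insert d "description") ?_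
      apply String.toList_injective
      simp [pvJoinBody, hl, pvJoin_cons]

lemma pvRenderA_eq_render (g : String × List String) : pvRenderA g = pvRender g := by
  unfold pvRenderA pvRender
  rw [pvDescFold_eq _ _ (pvD0_not_contains _)]
  rfl

lemma pvStep_comm (groups : List (String × List String)) (line : String) :
    pvStepA (pvStateOf groups) line = pvStateOf (pvGroupStep groups line) := by
  rw [pvStepA_eq]
  unfold pvGroupStep
  by_cases hh : pvIsHeader line = true
  · rw [if_pos hh, if_pos hh]
    unfold pvStateOf
    cases hg : groups.getLast? with
    | none =>
      have hnil : groups = [] := List.getLast?_eq_none_iff.mp hg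
      subst hnil
      simp [pvRenderA, PySem.Dict.empty]
    | some g =>
      rw [List.getLast?_concat, List.dropLast_concat]
      simp only [pvRenderA_ne_empty g, Bool.false_eq_true, if_false]
      refine congrArg₂ Prod.mk ?_ rfl
      rw [show [pvRenderA g] = List.map pvRenderA [g] from rfl, ← List.map_append]
      congr 1
      exact List.dropLast_append_getLast? g (Option.mem_def.mpr hg)
  · rw [if_neg hh, if_neg hh]
    cases hg : groups.getLast? with
    | none =>
      have hnil : groups = [] := List.getLast?_eq_none_iff.mp hg
      subst hnil
      simp [pvStateOf, PySem.Dict.empty]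
    | some g =>
      obtain ⟨h, b⟩ := g
      have hrw : pvStateOf groups = (groups.dropLast.map pvRenderA, pvRenderA (h, b)) := by
        unfold pvStateOf; rw [hg]
      have hrw2 : pvStateOf (groups.dropLast ++ [(h, b ++ [line])]) =
          (groups.dropLast.map pvRenderA, pvRenderA (h, b ++ [line])) := by
        unfold pvStateOf
        rw [List.getLast?_concat, List.dropLast_concat]
      have hstep : pvRenderA (h, b ++ [line]) = pvDescStep (pvRenderA (h, b)) line := by
        unfold pvRenderA
        exact List.foldl_append ..
      rw [hrw, hrw2, hstep]
      by_cases hl : PySem.Str.strip line = ""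
      · rw [if_neg (by simp [hl])]
        unfold pvDescStep
        rw [if_neg (by simp [hl])]
      · rw [if_pos (by simp [pvRenderA_ne_empty (h, b), hl])]
        unfold pvDescStep
        rw [if_pos hl]

lemma pvFold_comm (lines : List String) (groups : List (String × List String)) :
    lines.foldl pvStepA (pvStateOf groups) = pvStateOf (lines.foldl pvGroupStep groups) := by
  induction lines generalizing groups with
  | nil => rfl
  | cons l ls ih => simp only [List.foldl_cons, pvStep_comm]; exact ih _

-- ===== VERDICT (by name: the statement is the Claim_ definition above) =====
theorem parse_suggestions_from_text_py_spec : Claim_equal_parse_suggestions_from_text_py := by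
  intro text _
  show _ = _
  unfold parse_suggestions_from_text_py parse_suggestions_from_text_py_alt
  dsimp only
  have h := pvFold_comm ((PySem.Str.split? text "\n").getD []) []
  have h0 : pvStateOf [] = ([], PySem.Dict.empty) := rfl
  rw [h0] at h
  rw [h]
  set G := ((PySem.Str.split? text "\n").getD []).foldl pvGroupStep [] with hG
  have : (if (pvStateOf G).2.items.isEmpty then (pvStateOf G).1
          else (pvStateOf G).1 ++ [(pvStateOf G).2]) = G.map pvRenderA := by
    unfold pvStateOf
    cases hL : G.getLast? with
    | none => simp [List.getLast?_eq_none_iff.mp hL, PySem.Dict.empty]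
    | some g =>
      simp only [pvRenderA_ne_empty, Bool.false_eq_true, if_false]
      conv_rhs => rw [← List.dropLast_append_getLast? g (Option.mem_def.mpr hL)]
      simp
  rw [this, funext pvRenderA_eq_render]
  simp [List.map_take]
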